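-- pv_equiv track=rewrite | github.com/sipa/ezbase32 | ezbase32.py | convert5to8
-- ===== SOURCE A (Python) =====
-- def convert5to8(data):
--     acc = 0
--     bits = 0
--     ret = []
--     for u5 in data:
--         if u5 < 0 or u5 > 31:
--             raise Exception("Base32 data is outside [0..31]")
--         acc = (acc << 5) | u5
--         bits += 5
--         if (bits >= 8):
--             bits -= 8
--             ret.append((acc >> bits) & 0xFF)
--     if (acc << (8 - bits)) & 0xFF:
--         return None
--     return ret
-- ===== SOURCE B (Python) =====
-- def convert5to8(data):
--     acc = 0
--     n = 0
--     for u5 in data: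
--         if u5 < 0 or u5 > 31:
--             raise Exception("Base32 data is outside [0..31]")
--         acc = (acc << 5) | u5
--         n += 1
--     total = 5 * n
--     leftover = total % 8
--     nbytes = total // 8
--     if acc & ((1 << leftover) - 1):
--         return None
--     return [(acc >> (leftover + 8 * (nbytes - 1 - j))) & 0xFF for j in range(nbytes)]
-- ===== Notes on version B (the rewrite author's own statement) =====
-- stated objective: alternative
-- what changed: A streams bytes out of a sliding accumulator during the loop; B accumulates all 5-bit symbols into one big integer in a single pass and then derives the padding check and the byte list arithmetically from that integer.
import Mathlib
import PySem

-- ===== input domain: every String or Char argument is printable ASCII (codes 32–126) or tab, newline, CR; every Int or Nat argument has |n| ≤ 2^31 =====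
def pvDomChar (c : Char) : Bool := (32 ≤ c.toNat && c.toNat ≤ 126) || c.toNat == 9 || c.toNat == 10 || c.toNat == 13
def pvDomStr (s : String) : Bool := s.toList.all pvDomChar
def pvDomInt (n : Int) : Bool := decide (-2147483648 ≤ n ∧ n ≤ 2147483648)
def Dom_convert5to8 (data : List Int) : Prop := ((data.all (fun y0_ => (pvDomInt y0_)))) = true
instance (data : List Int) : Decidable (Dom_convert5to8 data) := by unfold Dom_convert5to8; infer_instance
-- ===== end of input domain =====

-- B replaces A's streaming byte emission by one accumulation pass into a single big
-- integer followed by an arithmetic slice of the bytes (alternative decomposition, same cost).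


-- ===== PORT A =====
-- A's loop: state (acc, bits, ret); 'raise' is modelled as none (excluded by Pre_).
def convert5to8_loopA : List Int → Int → Nat → List Int → Option (Int × Nat × List Int)
  | [], acc, bits, ret => some (acc, bits, ret)
  | u5 :: rest, acc, bits, ret =>
    if u5 < 0 ∨ 31 < u5 then none
    else
      let acc' := PySem.Int.bor (acc <<< 5) u5
      let bits' := bits + 5
      if 8 ≤ bits' then
        convert5to8_loopA rest acc' (bits' - 8) (ret ++ [PySem.Int.band (acc' >>> (bits' - 8)) 255])
      else
        convert5to8_loopA rest acc' bits' ret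

def convert5to8 (data : List Int) : Option (List Int) :=
  match convert5to8_loopA data 0 0 [] with
  | none => none
  | some (acc, bits, ret) =>
    if PySem.Int.band (acc <<< (8 - bits)) 255 ≠ 0 then none else some ret

-- ===== PORT B =====
-- B's first pass: only (acc, n); 'raise' modelled as none (excluded by Pre_).
def convert5to8_loopB : List Int → Int → Nat → Option (Int × Nat)
  | [], acc, n => some (acc, n)
  | u5 :: rest, acc, n =>
    if u5 < 0 ∨ 31 < u5 then none
    else convert5to8_loopB rest (PySem.Int.bor (acc <<< 5) u5) (n + 1)

def convert5to8_alt (data : List Int) : Option (List Int) :=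
  match convert5to8_loopB data 0 0 with
  | none => none
  | some (acc, n) =>
    let total := 5 * n
    let leftover := total % 8
    let nbytes := total / 8
    if PySem.Int.band acc ((1 <<< leftover) - 1) ≠ 0 then none
    else some ((List.range nbytes).map
      (fun j => PySem.Int.band (acc >>> (leftover + 8 * (nbytes - 1 - j))) 255))

-- ===== PRECONDITION & SPEC =====
-- Pre_ excludes exactly the inputs with a symbol outside [0..31], where A raises Exception.
def Pre_convert5to8 (data : List Int) : Prop := ∀ u ∈ data, 0 ≤ u ∧ u ≤ 31
instance (data : List Int) : Decidable (Pre_convert5to8 data) := by unfold Pre_convert5to8; infer_instance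
def pvWitness_convert5to8 : List Int := [1, 2]

def Spec_convert5to8 (data : List Int) (out : Option (List Int)) : Prop := out = convert5to8_alt data
instance (data : List Int) (out : Option (List Int)) : Decidable (Spec_convert5to8 data out) := by unfold Spec_convert5to8; infer_instance

-- ===== CLAIM (what is proved, stated in full; the proofs are below) =====
def Claim_equal_convert5to8 : Prop := ∀ (data : List Int), Dom_convert5to8 data → Pre_convert5to8 data → Spec_convert5to8 data (convert5to8 data)

-- ===== LEMMAS AND PROOFS =====

-- The accumulated integer, over Nat (all symbols are in [0..31] under Pre_).
def pvNatAcc : List Int → Nat → Nat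
  | [], a => a
  | u :: r, a => pvNatAcc r (32 * a + u.toNat)

theorem pvStep_eq (a : Nat) (u : Int) (h0 : 0 ≤ u) (h31 : u ≤ 31) :
    PySem.Int.bor ((a : Int) <<< 5) u = ((32 * a + u.toNat : Nat) : Int) := by
  obtain ⟨v, rfl⟩ := Int.eq_ofNat_of_zero_le h0
  have hv : v < 2 ^ 5 := by exact_mod_cast (by omega : (v : Int) < 32)
  have hc : ((a : Int) <<< 5) = ((a <<< 5 : Nat) : Int) := rfl
  rw [hc, Int.toNat_natCast, PySem.Int.bor_natCast]
  have h2 : (2:Nat) ^ 5 * a + v = 2 ^ 5 * a ||| v := Nat.two_pow_add_eq_or_of_lt hv a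
  have h3 : a <<< 5 = 2 ^ 5 * a := by rw [Nat.shiftLeft_eq]; ring
  rw [h3, ← h2]
  norm_num

theorem pvBand255 (x : Nat) : PySem.Int.band ((x : Nat) : Int) 255 = ((x % 256 : Nat) : Int) := by
  have h : (255 : Int) = ((255 : Nat) : Int) := rfl
  rw [h, PySem.Int.band_natCast]
  have : (255 : Nat) = 2 ^ 8 - 1 := rfl
  rw [this, Nat.and_two_pow_sub_one_eq_mod]

theorem pvNatAcc_div : ∀ (data : List Int) (a : Nat), Pre_convert5to8 data →
    pvNatAcc data a / 2 ^ (5 * data.length) = a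
  | [], a, _ => by simp [pvNatAcc]
  | u :: r, a, h => by
    have hu := h u (by simp)
    have hr : Pre_convert5to8 r := fun x hx => h x (by simp [hx])
    have hv : u.toNat < 32 := by omega
    have ih := pvNatAcc_div r (32 * a + u.toNat) hr
    simp only [pvNatAcc, List.length_cons]
    have h1 : 5 * (r.length + 1) = 5 * r.length + 5 := by ring
    rw [h1, pow_add, ← Nat.div_div_eq_div_mul, ih]
    omega

-- Characterization of A's loop under Pre_ (bits < 8 is the loop invariant).
theorem pvLoopA_char : ∀ (data : List Int) (a b : Nat) (r : List Int),
    Pre_convert5to8 data → b < 8 →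
    convert5to8_loopA data ((a : Nat) : Int) b r =
      some (((pvNatAcc data a : Nat) : Int), (b + 5 * data.length) % 8,
        r ++ (List.range ((b + 5 * data.length) / 8)).map
          (fun j => ((pvNatAcc data a / 2 ^ ((b + 5 * data.length) - 8 * (j + 1)) % 256 : Nat) : Int)))
  | [], a, b, r, _, hb => by
    simp [convert5to8_loopA, pvNatAcc, Nat.div_eq_of_lt hb, Nat.mod_eq_of_lt hb]
  | u :: rest, a, b, r, h, hb => by
    have hu := h u (by simp)
    have hr : Pre_convert5to8 rest := fun x hx => h x (by simp [hx])
    have hneg : ¬ (u < 0 ∨ 31 < u) := by omega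
    simp only [convert5to8_loopA, if_neg hneg, List.length_cons]
    rw [pvStep_eq a u hu.1 hu.2]
    set a' := 32 * a + u.toNat with ha'
    by_cases hemit : 8 ≤ b + 5
    · rw [if_pos hemit]
      have hb' : b + 5 - 8 < 8 := by omega
      have ih := pvLoopA_char rest a' (b + 5 - 8) (r ++ [PySem.Int.band (((a' : Nat) : Int) >>> (b + 5 - 8)) 255]) hr hb'
      rw [ih]
      have hacc : pvNatAcc rest a' = pvNatAcc (u :: rest) a := by simp [pvNatAcc, ha']
      set A := pvNatAcc rest a' with hA
      -- totals
      set T := b + 5 * (rest.length + 1) with hT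
      have hTt : (b + 5 - 8) + 5 * rest.length = T - 8 := by omega
      have hT8 : 8 ≤ T := by omega
      have hmod : (T - 8) % 8 = T % 8 := by omega
      have hdiv : (T - 8) / 8 = T / 8 - 1 := by omega
      have hm1 : T / 8 = (T / 8 - 1) + 1 := by omega
      -- the emitted byte equals byte 0 of the final characterization
      have hdivA : A / 2 ^ (5 * rest.length) = a' := pvNatAcc_div rest a' hr
      have hbyte : PySem.Int.band (((a' : Nat) : Int) >>> (b + 5 - 8)) 255
          = ((A / 2 ^ (T - 8 * (0 + 1)) % 256 : Nat) : Int) := by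
        have hsr : (((a' : Nat) : Int) >>> (b + 5 - 8)) = ((a' >>> (b + 5 - 8) : Nat) : Int) := rfl
        rw [hsr, pvBand255, Nat.shiftRight_eq_div_pow]
        have he : T - 8 * (0 + 1) = 5 * rest.length + (b + 5 - 8) := by omega
        rw [he, pow_add, ← Nat.div_div_eq_div_mul, hdivA]
      rw [hacc] at hbyte
      rw [hacc, hTt, hmod, hdiv, List.append_assoc, List.singleton_append]
      conv_rhs => rw [hm1, List.range_succ_eq_map, List.map_cons, List.map_map]
      rw [hbyte]
      refine congrArg some (congrArg₂ Prod.mk rfl (congrArg₂ Prod.mk rfl (congrArg₂ (· ++ ·) rfl (congrArg₂ List.cons rfl ?_))))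
      apply List.map_congr_left
      intro j hj
      simp only [Function.comp, Nat.succ_eq_add_one]
      have he : T - 8 - 8 * (j + 1) = T - 8 * (j + 1 + 1) := by omega
      rw [he]
    · rw [if_neg hemit]
      have hb' : b + 5 < 8 := by omega
      have ih := pvLoopA_char rest a' (b + 5) r hr hb'
      rw [ih]
      have he : (b + 5) + 5 * rest.length = b + 5 * (rest.length + 1) := by ring
      rw [he]
      congr 1

theorem pvLoopB_char : ∀ (data : List Int) (a n : Nat),
    Pre_convert5to8 data →
    convert5to8_loopB data ((a : Nat) : Int) n = some (((pvNatAcc data a : Nat) : Int), n + data.length)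
  | [], a, n, _ => by simp [convert5to8_loopB, pvNatAcc]
  | u :: rest, a, n, h => by
    have hu := h u (by simp)
    have hr : Pre_convert5to8 rest := fun x hx => h x (by simp [hx])
    have hneg : ¬ (u < 0 ∨ 31 < u) := by omega
    simp only [convert5to8_loopB, if_neg hneg]
    rw [pvStep_eq a u hu.1 hu.2, pvLoopB_char rest (32 * a + u.toNat) (n + 1) hr]
    simp [pvNatAcc]
    omega

-- padding tests agree: (A << (8-b)) & 255 ≠ 0  ↔  A & (2^b - 1) ≠ 0  (b < 8)
theorem pvPad_iff (A b : Nat) (hb : b < 8) :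
    (A <<< (8 - b)) % 256 = 0 ↔ A % 2 ^ b = 0 := by
  have h1 : (256 : Nat) = 2 ^ b * 2 ^ (8 - b) := by
    have h8 : b + (8 - b) = 8 := by omega
    rw [← pow_add, h8]; norm_num
  rw [Nat.shiftLeft_eq, h1, Nat.mul_mod_mul_right]
  have h2 : 0 < 2 ^ (8 - b) := Nat.pow_pos (by omega)
  constructor
  · intro h
    rcases Nat.mul_eq_zero.mp h with h' | h'
    · exact h'
    · omega
  · intro h; rw [h, Nat.zero_mul]

-- ===== VERDICT (by name: the statement is the Claim_ definition above) =====
theorem convert5to8_spec : Claim_equal_convert5to8 := by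
  intro data _ hpre
  unfold Spec_convert5to8 convert5to8 convert5to8_alt
  have hA := pvLoopA_char data 0 0 [] hpre (by omega)
  have hB := pvLoopB_char data 0 0 hpre
  simp only [Nat.cast_zero] at hA hB
  rw [hA, hB]
  simp only [Nat.zero_add, List.nil_append]
  set A := pvNatAcc data 0 with hAdef
  set T := 5 * data.length with hTdef
  have hTeq : 0 + 5 * data.length = T := by omega
  rw [hTeq] at *
  have hb : T % 8 < 8 := Nat.mod_lt _ (by omega)
  -- the two padding conditions
  have hshl : (((A : Nat) : Int) <<< (8 - T % 8)) = ((A <<< (8 - T % 8) : Nat) : Int) := rfl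
  have hcondA : PySem.Int.band (((A : Nat) : Int) <<< (8 - T % 8)) 255
      = (((A <<< (8 - T % 8)) % 256 : Nat) : Int) := by rw [hshl, pvBand255]
  have hcondB : PySem.Int.band ((A : Nat) : Int) (((1 <<< (T % 8) : Nat) : Int) - 1)
      = ((A % 2 ^ (T % 8) : Nat) : Int) := by
    have h2 : ((1 <<< (T % 8) : Nat) : Int) - 1 = (((2 ^ (T % 8) - 1 : Nat)) : Int) := by
      have : (1 : Nat) <<< (T % 8) = 2 ^ (T % 8) := by rw [Nat.shiftLeft_eq]; ring
      rw [this]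
      have hp : 1 ≤ (2:Nat) ^ (T % 8) := Nat.one_le_two_pow
      push_cast [hp]
      ring
    rw [h2, PySem.Int.band_natCast, Nat.and_two_pow_sub_one_eq_mod]
  rw [hcondA, hcondB]
  have hiff := pvPad_iff A (T % 8) hb
  by_cases hz : A % 2 ^ (T % 8) = 0
  · have hz' : (A <<< (8 - T % 8)) % 256 = 0 := hiff.mpr hz
    rw [hz, hz']
    simp only [Nat.cast_zero, ne_eq, not_true_eq_false, if_neg, not_false_eq_true]
    congr 1
    apply List.map_congr_left
    intro j hj
    simp only [List.mem_range] at hj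
    have hsr : (((A : Nat) : Int) >>> (T % 8 + 8 * (T / 8 - 1 - j))) = ((A >>> (T % 8 + 8 * (T / 8 - 1 - j)) : Nat) : Int) := rfl
    rw [hsr, pvBand255, Nat.shiftRight_eq_div_pow]
    have he : T % 8 + 8 * (T / 8 - 1 - j) = T - 8 * (j + 1) := by
      have := Nat.div_add_mod T 8
      omega
    rw [he]
  · have hz' : (A <<< (8 - T % 8)) % 256 ≠ 0 := fun h => hz (hiff.mp h)
    rw [if_pos (by exact_mod_cast hz'), if_pos (by exact_mod_cast hz)]
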